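-- pv_equiv track=rewrite | github.com/benslv/aoc | 2021/11/11.py | process_flashes
-- ===== SOURCE A (Python) =====
-- def process_flashes(y, x, octopi, will_flash):
--     adjacent = [(y-1, x-1), (y-1, x), (y-1, x+1), (y, x-1),
--                 (y, x+1), (y+1, x-1), (y+1, x), (y+1, x+1)]
--
--     # Increment adjacent octopi.
--     for j, i in adjacent:
--         if j in range(len(octopi)) and i in range(len(octopi[j])):
--             octopi[j][i] += 1
--
--             # If an incremented octopus now has enough energy to flash
--             # add it to the set and process its neighbours
--             if (octopi[j][i] > 9) and (j, i) not in will_flash: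
--                 will_flash |= process_flashes(
--                     j, i, octopi, will_flash | {(j, i)})
--
--     return will_flash
-- ===== SOURCE B (Python) =====
-- def _neighbors(y, x):
--     return [(y - 1, x - 1), (y - 1, x), (y - 1, x + 1), (y, x - 1),
--             (y, x + 1), (y + 1, x - 1), (y + 1, x), (y + 1, x + 1)]
--
--
-- def process_flashes(y, x, octopi, will_flash):
--     # Iterative flood fill with an explicit stack of pending neighbour lists:
--     # no recursion and no set copies / unions, one shared set mutated in place.
--     stack = [_neighbors(y, x)]
--     while stack:
--         pending = stack[-1]
--         if not pending:
--             stack.pop()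
--             continue
--         j, i = pending.pop(0)
--         if 0 <= j < len(octopi) and 0 <= i < len(octopi[j]):
--             octopi[j][i] += 1
--             if octopi[j][i] > 9 and (j, i) not in will_flash:
--                 will_flash.add((j, i))
--                 stack.append(_neighbors(j, i))
--     return will_flash
-- ===== Notes on version B (the rewrite author's own statement) =====
-- stated objective: alternative
-- what changed: Replaces A's recursive flood fill that copies the flash set at every call and merges child results back with set unions by an iterative loop over an explicit stack of pending neighbour lists that mutates one shared set in place (no recursion, no set copies/unions).
import Mathlib
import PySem

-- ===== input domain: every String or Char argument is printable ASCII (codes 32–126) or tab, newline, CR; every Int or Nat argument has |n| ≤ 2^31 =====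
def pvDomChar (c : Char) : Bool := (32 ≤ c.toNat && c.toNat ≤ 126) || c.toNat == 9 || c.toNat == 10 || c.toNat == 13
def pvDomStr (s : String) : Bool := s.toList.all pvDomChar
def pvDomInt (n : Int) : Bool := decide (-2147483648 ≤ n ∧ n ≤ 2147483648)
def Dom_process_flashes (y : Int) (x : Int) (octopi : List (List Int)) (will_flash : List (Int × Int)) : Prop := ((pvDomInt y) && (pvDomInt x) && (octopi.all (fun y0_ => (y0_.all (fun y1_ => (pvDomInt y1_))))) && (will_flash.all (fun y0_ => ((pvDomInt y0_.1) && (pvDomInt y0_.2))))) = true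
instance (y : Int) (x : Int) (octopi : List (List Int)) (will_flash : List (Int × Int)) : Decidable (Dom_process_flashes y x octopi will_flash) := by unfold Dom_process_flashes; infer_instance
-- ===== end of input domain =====

-- B replaces A's recursive flood fill (which copies and re-unions the flash set at every
-- call) by an iterative loop over an explicit stack of pending neighbour lists mutating one
-- shared set; equivalence is about the RETURN value (both Pythons also mutate `octopi` and
-- `will_flash` in place, in the same way).

-- ===== shared helpers (both Pythons compute these same intermediate values) =====

-- the `adjacent` list of A / `_neighbors` of B
def pvAdj (y x : Int) : List (Int × Int) :=
  [(y - 1, x - 1), (y - 1, x), (y - 1, x + 1), (y, x - 1),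
   (y, x + 1), (y + 1, x - 1), (y + 1, x), (y + 1, x + 1)]

-- `j in range(len(octopi)) and i in range(len(octopi[j]))` (short-circuit safe: pyGetD defaults)
def pvInb (g : List (List Int)) (j i : Int) : Bool :=
  decide (0 ≤ j ∧ j < (g.length : Int)) &&
  decide (0 ≤ i ∧ i < ((PySem.List.pyGetD g j []).length : Int))

-- `octopi[j][i]`
def pvVal (g : List (List Int)) (j i : Int) : Int :=
  PySem.List.pyGetD (PySem.List.pyGetD g j []) i 0

-- `octopi[j][i] += 1`
def pvBump (g : List (List Int)) (j i : Int) : List (List Int) :=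
  PySem.List.pySetD g j
    (PySem.List.pySetD (PySem.List.pyGetD g j []) i (pvVal g j i + 1))

-- ===== termination measure and invariant machinery (needed by the port definitions) =====

-- all in-bounds coordinates, from the row-length shape
def pvCells (sh : List Nat) : List (Int × Int) :=
  (List.range sh.length).flatMap
    (fun j => (List.range (sh.getD j 0)).map (fun i => ((j : Int), (i : Int))))

-- number of in-bounds cells not yet marked to flash
def pvFree (g : List (List Int)) (wf : List (Int × Int)) : Nat :=
  (pvCells (g.map List.length)).countP (fun c => !(decide (c ∈ wf)))

-- wf' extends wf by fresh elements appended at the end (what Set.add / the A-side unions produce)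
def pvExt (wf wf' : List (Int × Int)) : Prop :=
  ∃ ex, wf' = wf ++ ex ∧ ex.Nodup ∧ ∀ c ∈ ex, c ∉ wf

theorem pvExt_refl (wf : List (Int × Int)) : pvExt wf wf :=
  ⟨[], by simp⟩

theorem pvExt_trans {a b c : List (Int × Int)} (h1 : pvExt a b) (h2 : pvExt b c) : pvExt a c := by
  obtain ⟨e1, rfl, hn1, hf1⟩ := h1
  obtain ⟨e2, rfl, hn2, hf2⟩ := h2
  refine ⟨e1 ++ e2, by simp, ?_, ?_⟩
  · refine List.Nodup.append hn1 hn2 ?_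
    intro x hx1 hx2
    exact hf2 x hx2 (by simp [hx1])
  · intro cc hcc hca
    rcases List.mem_append.1 hcc with h | h
    · exact hf1 cc h hca
    · exact hf2 cc h (by simp [hca])

theorem pvExt_mem {a b : List (Int × Int)} (h : pvExt a b) {c : Int × Int} (hc : c ∈ a) : c ∈ b := by
  obtain ⟨ex, rfl, -, -⟩ := h; exact List.mem_append.2 (Or.inl hc)

theorem pvExt_add (wf : List (Int × Int)) (c : Int × Int) : pvExt wf (PySem.Set.add wf c) := by
  by_cases hc : c ∈ wf
  · rw [PySem.Set.add_of_mem hc]; exact pvExt_refl wf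
  · rw [PySem.Set.add_of_not_mem hc]
    exact ⟨[c], rfl, by simp, by simpa using hc⟩

-- `will_flash | {(j, i)}` is `will_flash.add((j, i))`
theorem pvUnion_singleton (wf : List (Int × Int)) (c : Int × Int) :
    PySem.Set.union wf [c] = PySem.Set.add wf c := rfl

theorem pvUpdate_of_subset (l : List (Int × Int)) (s : List (Int × Int))
    (h : ∀ c ∈ l, c ∈ s) : PySem.Set.update s l = s := by
  induction l generalizing s with
  | nil => rfl
  | cons a l ih =>
    rw [PySem.Set.update_cons, PySem.Set.add_of_mem (h a (by simp))]
    exact ih s (fun c hc => h c (by simp [hc]))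

-- the A-side `will_flash |= result` collapses when result extends will_flash
theorem pvUnion_ext {a b : List (Int × Int)} (h : pvExt a b) : PySem.Set.union a b = b := by
  obtain ⟨ex, rfl, hn, hf⟩ := h
  show PySem.Set.update a (a ++ ex) = a ++ ex
  rw [PySem.Set.update_append, pvUpdate_of_subset a a (fun _ hc => hc),
      PySem.Set.update_eq_append_of_disjoint a ex hn hf]

theorem pvCountP_lt {α : Type} (p q : α → Bool) (l : List α)
    (h : ∀ x ∈ l, p x = true → q x = true) (x0 : α) (hx0 : x0 ∈ l)
    (hp : p x0 = false) (hq : q x0 = true) : l.countP p < l.countP q := by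
  induction l with
  | nil => simp at hx0
  | cons a l ih =>
    rcases List.mem_cons.1 hx0 with rfl | hmem
    · rw [List.countP_cons_of_neg (by simp [hp]), List.countP_cons_of_pos hq]
      exact Nat.lt_succ_of_le (List.countP_mono_left (fun x hx => h x (by simp [hx])))
    · have hlt := ih (fun x hx => h x (by simp [hx])) hmem
      by_cases ha : p a = true
      · rw [List.countP_cons_of_pos ha, List.countP_cons_of_pos (h a (by simp) ha)]
        omega
      · rw [List.countP_cons_of_neg ha]
        calc l.countP p < l.countP q := hlt
          _ ≤ (a :: l).countP q := by rw [List.countP_cons]; omega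

theorem pvFree_lt {a b : List (Int × Int)} (g : List (List Int)) (c0 : Int × Int)
    (hcell : c0 ∈ pvCells (g.map List.length)) (ha : c0 ∉ a) (hb : c0 ∈ b)
    (h : ∀ c, c ∈ a → c ∈ b) : pvFree g b < pvFree g a := by
  refine pvCountP_lt _ _ _ (fun c _ => ?_) c0 hcell (by simp [hb]) (by simp [ha])
  simp only [Bool.not_eq_eq_eq_not, Bool.not_true, decide_eq_false_iff_not]
  intro hnb; exact fun hc => hnb (h c hc)

theorem pvFree_congr {g g' : List (List Int)} (h : g.map List.length = g'.map List.length)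
    (wf : List (Int × Int)) : pvFree g wf = pvFree g' wf := by
  unfold pvFree; rw [h]

theorem pvInb_iff (g : List (List Int)) (j i : Int) :
    pvInb g j i = true ↔
      (0 ≤ j ∧ j < (g.length : Int)) ∧ 0 ≤ i ∧ i < ((PySem.List.pyGetD g j []).length : Int) := by
  simp [pvInb]

theorem pvPyGetD_toNat (g : List (List Int)) (j : Int) (hj : 0 ≤ j) :
    PySem.List.pyGetD g j [] = g.getD j.toNat [] := by
  conv_lhs => rw [← Int.toNat_of_nonneg hj]
  rw [PySem.List.pyGetD_natCast]

theorem pvMem_cells (g : List (List Int)) (j i : Int) (h : pvInb g j i = true) :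
    (j, i) ∈ pvCells (g.map List.length) := by
  obtain ⟨⟨hj0, hjl⟩, hi0, hil⟩ := (pvInb_iff g j i).1 h
  rw [pvPyGetD_toNat g j hj0] at hil
  have hmap : (g.map List.length).getD j.toNat 0 = (g.getD j.toNat []).length := by
    simpa using List.getD_map g [] List.length (n := j.toNat)
  have h1 : j.toNat < g.length := by omega
  have h2 : i.toNat < (g.map List.length).getD j.toNat 0 := by rw [hmap]; omega
  have h3 : ((j.toNat : Int), i) = (j, i) := by
    simp [Int.toNat_of_nonneg hj0]
  simp only [pvCells, List.mem_flatMap, List.mem_map, List.mem_range, List.length_map]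
  refine ⟨j.toNat, h1, i, ?_, h3⟩
  have hex : ∃ a, a < (g.map List.length).getD j.toNat 0 ∧ i = ((a : Nat) : Int) :=
    ⟨i.toNat, h2, (Int.toNat_of_nonneg hi0).symm⟩
  simpa using hex

theorem pvMap_length_set_same (l : List (List Int)) (n : Nat) (r : List Int)
    (hr : r.length = (l.getD n []).length) : (l.set n r).map List.length = l.map List.length := by
  induction l generalizing n with
  | nil => simp
  | cons a l ih =>
    cases n with
    | zero => simp_all [List.getD]
    | succ m => simp_all [List.getD]

theorem pvBump_shape (g : List (List Int)) (j i : Int) (hj : 0 ≤ j) :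
    (pvBump g j i).map List.length = g.map List.length := by
  unfold pvBump
  rw [PySem.List.pySetD_of_nonneg _ _ hj]
  refine pvMap_length_set_same g j.toNat _ ?_
  rw [PySem.List.length_pySetD, pvPyGetD_toNat g j hj]

theorem pvFree_bump (g : List (List Int)) (j i : Int) (hj : 0 ≤ j) (wf : List (Int × Int)) :
    pvFree (pvBump g j i) wf = pvFree g wf := by
  unfold pvFree; rw [pvBump_shape g j i hj]

-- flash step strictly shrinks the free-cell count
theorem pvFree_flash {g : List (List Int)} {j i : Int} (hin : pvInb g j i = true)
    {wf wf' : List (Int × Int)} (hnm : (j, i) ∉ wf) (hmem : (j, i) ∈ wf')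
    (hsub : ∀ c, c ∈ wf → c ∈ wf') : pvFree g wf' < pvFree g wf :=
  pvFree_lt g (j, i) (pvMem_cells g j i hin) hnm hmem hsub

theorem pvMem_add_self (wf : List (Int × Int)) (c : Int × Int) : c ∈ PySem.Set.add wf c := by
  simp [PySem.Set.mem_add]

theorem pvMem_add_of_mem (wf : List (Int × Int)) (c c' : Int × Int) (h : c ∈ wf) :
    c ∈ PySem.Set.add wf c' := by
  simp [PySem.Set.mem_add, h]

theorem pvExt_union_singleton (wf : List (Int × Int)) (c : Int × Int) :
    pvExt wf (PySem.Set.union wf [c]) := by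
  rw [pvUnion_singleton]; exact pvExt_add wf c

theorem pvExt_through_union {wf c2 r2 : List (Int × Int)} (hcx : pvExt wf c2)
    (hr : pvExt (PySem.Set.union wf c2) r2) : pvExt wf r2 := by
  rw [pvUnion_ext hcx] at hr; exact pvExt_trans hcx hr

theorem pvFree_flash_union (g : List (List Int)) (j i : Int) (wf : List (Int × Int))
    (hin : pvInb g j i = true) (hnm : (j, i) ∉ wf) :
    pvFree (pvBump g j i) (PySem.Set.union wf [(j, i)]) < pvFree g wf := by
  rw [pvFree_bump g j i ((pvInb_iff g j i).1 hin).1.1, pvUnion_singleton]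
  exact pvFree_flash hin hnm (pvMem_add_self wf (j, i))
    (fun c hc => pvMem_add_of_mem wf c (j, i) hc)

-- the four decrease facts for A's recursion
theorem pvDecA1 (g : List (List Int)) (j i : Int) (wf rest : List (Int × Int))
    (hin : pvInb g j i = true) (hnm : (j, i) ∉ wf) :
    9 * pvFree (pvBump g j i) (PySem.Set.union wf [(j, i)]) + (pvAdj j i).length <
      9 * pvFree g wf + ((j, i) :: rest).length := by
  have h := pvFree_flash_union g j i wf hin hnm
  simp only [pvAdj, List.length_cons, List.length_nil]; omega

theorem pvDecA2 (g c1 : List (List Int)) (wf c2 rest : List (Int × Int)) (j i : Int)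
    (hsh : c1.map List.length = g.map List.length)
    (hx : pvExt (PySem.Set.union wf [(j, i)]) c2)
    (hin : pvInb g j i = true) (hnm : (j, i) ∉ wf) :
    9 * pvFree c1 (PySem.Set.union wf c2) + rest.length <
      9 * pvFree g wf + ((j, i) :: rest).length := by
  have hcx : pvExt wf c2 := pvExt_trans (pvExt_union_singleton wf (j, i)) hx
  rw [pvFree_congr hsh, pvUnion_ext hcx]
  have hmem : (j, i) ∈ c2 :=
    pvExt_mem hx (by rw [pvUnion_singleton]; exact pvMem_add_self wf (j, i))
  have h := pvFree_flash hin hnm hmem (fun c hc => pvExt_mem hcx hc)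
  simp only [List.length_cons]; omega

theorem pvDecA3 (g : List (List Int)) (j i : Int) (wf rest : List (Int × Int)) (hj0 : 0 ≤ j) :
    9 * pvFree (pvBump g j i) wf + rest.length < 9 * pvFree g wf + ((j, i) :: rest).length := by
  rw [pvFree_bump g j i hj0]; simp only [List.length_cons]; omega

theorem pvDecA4 (f : Nat) (c : Int × Int) (rest : List (Int × Int)) :
    9 * f + rest.length < 9 * f + (c :: rest).length := by
  simp only [List.length_cons]; omega

-- the four decrease facts for B's stack loop
theorem pvDecB1 (f : Nat) (stk : List (List (Int × Int))) :
    9 * f + ((stk.map List.length).sum + stk.length) <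
      9 * f + (((([] : List (Int × Int)) :: stk).map List.length).sum
        + (([] : List (Int × Int)) :: stk).length) := by
  simp only [List.map_cons, List.sum_cons, List.length_cons, List.length_nil]; omega

theorem pvDecB2 (g : List (List Int)) (j i : Int) (wf pend : List (Int × Int))
    (stk : List (List (Int × Int))) (hin : pvInb g j i = true) (hnm : (j, i) ∉ wf) :
    9 * pvFree (pvBump g j i) (PySem.Set.add wf (j, i)) +
        (((pvAdj j i :: pend :: stk).map List.length).sum + (pvAdj j i :: pend :: stk).length) <
      9 * pvFree g wf +
        (((((j, i) :: pend) :: stk).map List.length).sum + (((j, i) :: pend) :: stk).length) := by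
  have h := pvFree_flash_union g j i wf hin hnm
  rw [pvUnion_singleton] at h
  simp only [pvAdj, List.map_cons, List.sum_cons, List.length_cons, List.length_nil]; omega

theorem pvDecB3 (g : List (List Int)) (j i : Int) (wf pend : List (Int × Int))
    (stk : List (List (Int × Int))) (hj0 : 0 ≤ j) :
    9 * pvFree (pvBump g j i) wf + (((pend :: stk).map List.length).sum + (pend :: stk).length) <
      9 * pvFree g wf +
        (((((j, i) :: pend) :: stk).map List.length).sum + (((j, i) :: pend) :: stk).length) := by
  rw [pvFree_bump g j i hj0]
  simp only [List.map_cons, List.sum_cons, List.length_cons]; omega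

theorem pvDecB4 (f : Nat) (j i : Int) (pend : List (Int × Int))
    (stk : List (List (Int × Int))) :
    9 * f + (((pend :: stk).map List.length).sum + (pend :: stk).length) <
      9 * f + (((((j, i) :: pend) :: stk).map List.length).sum + (((j, i) :: pend) :: stk).length) := by
  simp only [List.map_cons, List.sum_cons, List.length_cons]; omega

-- ===== PORT A =====
-- A threads the mutated grid and set through the recursion (value semantics for the in-place
-- mutation); the subtype carries shape preservation and the set-extension invariant that the
-- well-founded recursion needs.
def pvGoA : (p : List (Int × Int)) → (g : List (List Int)) → (wf : List (Int × Int)) →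
    { r : List (List Int) × List (Int × Int) //
        r.1.map List.length = g.map List.length ∧ pvExt wf r.2 }
  | [], g, wf => ⟨(g, wf), rfl, pvExt_refl wf⟩
  | (j, i) :: rest, g, wf =>
    if hin : pvInb g j i = true then
      -- octopi[j][i] += 1
      have hj0 : 0 ≤ j := ((pvInb_iff g j i).1 hin).1.1
      let g' := pvBump g j i
      have hg' : g'.map List.length = g.map List.length := pvBump_shape g j i hj0
      if hfl : pvVal g' j i > 9 ∧ (j, i) ∉ wf then
        -- will_flash |= process_flashes(j, i, octopi, will_flash | {(j, i)})
        let c := pvGoA (pvAdj j i) g' (PySem.Set.union wf [(j, i)])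
        have hc1 : c.val.1.map List.length = g.map List.length := c.property.1.trans hg'
        have hcx : pvExt wf c.val.2 :=
          pvExt_trans (pvExt_union_singleton wf (j, i)) c.property.2
        let r := pvGoA rest c.val.1 (PySem.Set.union wf c.val.2)
        ⟨r.val, r.property.1.trans hc1, pvExt_through_union hcx r.property.2⟩
      else
        let r := pvGoA rest g' wf
        ⟨r.val, r.property.1.trans hg', r.property.2⟩
    else
      pvGoA rest g wf
termination_by p g wf => 9 * pvFree g wf + p.length
decreasing_by
  · exact pvDecA1 g j i wf rest hin hfl.2
  · exact pvDecA2 g c.val.1 wf c.val.2 rest j i hc1 c.property.2 hin hfl.2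
  · exact pvDecA3 g j i wf rest hj0
  · exact pvDecA4 (pvFree g wf) (j, i) rest

def process_flashes (y : Int) (x : Int) (octopi : List (List Int)) (will_flash : List (Int × Int)) : List (Int × Int) :=
  (pvGoA (pvAdj y x) octopi will_flash).val.2

-- ===== PORT B =====
-- iterative flood fill: stack of pending neighbour lists (head = top of stack), one shared set
def pvRunB : (stk : List (List (Int × Int))) → (g : List (List Int)) → (wf : List (Int × Int)) →
    List (Int × Int)
  | [], _, wf => wf
  | [] :: stk, g, wf => pvRunB stk g wf
  | ((j, i) :: pend) :: stk, g, wf =>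
    if hin : pvInb g j i = true then
      -- octopi[j][i] += 1
      have hj0 : 0 ≤ j := ((pvInb_iff g j i).1 hin).1.1
      let g' := pvBump g j i
      if hfl : pvVal g' j i > 9 ∧ (j, i) ∉ wf then
        -- will_flash.add((j, i)); stack.append(_neighbors(j, i))
        pvRunB (pvAdj j i :: pend :: stk) g' (PySem.Set.add wf (j, i))
      else
        pvRunB (pend :: stk) g' wf
    else
      pvRunB (pend :: stk) g wf
termination_by stk g wf => 9 * pvFree g wf + ((stk.map List.length).sum + stk.length)
decreasing_by
  · exact pvDecB1 (pvFree g wf) stk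
  · exact pvDecB2 g j i wf pend stk hin hfl.2
  · exact pvDecB3 g j i wf pend stk hj0
  · exact pvDecB4 (pvFree g wf) j i pend stk

def process_flashes_alt (y : Int) (x : Int) (octopi : List (List Int)) (will_flash : List (Int × Int)) : List (Int × Int) :=
  pvRunB [pvAdj y x] octopi will_flash

-- ===== PRECONDITION & SPEC =====
def Spec_process_flashes (y : Int) (x : Int) (octopi : List (List Int)) (will_flash : List (Int × Int)) (out : List (Int × Int)) : Prop := out = process_flashes_alt y x octopi will_flash
instance (y : Int) (x : Int) (octopi : List (List Int)) (will_flash : List (Int × Int)) (out : List (Int × Int)) : Decidable (Spec_process_flashes y x octopi will_flash out) := by unfold Spec_process_flashes; infer_instance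

-- ===== CLAIM (what is proved, stated in full; the proofs are below) =====
def Claim_equal_process_flashes : Prop := ∀ (y : Int) (x : Int) (octopi : List (List Int)) (will_flash : List (Int × Int)), Dom_process_flashes y x octopi will_flash → Spec_process_flashes y x octopi will_flash (process_flashes y x octopi will_flash)

-- ===== LEMMAS AND PROOFS =====

-- simulation: running the stack machine with frame p on top is running A's frame body first
theorem pvSim (p : List (Int × Int)) (g : List (List Int)) (wf : List (Int × Int))
    (stk : List (List (Int × Int))) :
    pvRunB (p :: stk) g wf = pvRunB stk (pvGoA p g wf).val.1 (pvGoA p g wf).val.2 := by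
  match p with
  | [] => rw [pvRunB, pvGoA]
  | (j, i) :: rest =>
    by_cases hin : pvInb g j i = true
    · have hj0 : 0 ≤ j := ((pvInb_iff g j i).1 hin).1.1
      by_cases hfl : pvVal (pvBump g j i) j i > 9 ∧ (j, i) ∉ wf
      · have hwfu : pvExt wf (PySem.Set.union wf [(j, i)]) := by
          rw [pvUnion_singleton]; exact pvExt_add wf (j, i)
        have hcx : pvExt wf (pvGoA (pvAdj j i) (pvBump g j i) (PySem.Set.union wf [(j, i)])).val.2 :=
          pvExt_trans hwfu (pvGoA (pvAdj j i) (pvBump g j i) (PySem.Set.union wf [(j, i)])).property.2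
        have hcu : PySem.Set.union wf (pvGoA (pvAdj j i) (pvBump g j i) (PySem.Set.union wf [(j, i)])).val.2
            = (pvGoA (pvAdj j i) (pvBump g j i) (PySem.Set.union wf [(j, i)])).val.2 := pvUnion_ext hcx
        rw [pvRunB, pvGoA, dif_pos hin, dif_pos hfl, dif_pos hin, dif_pos hfl]
        show pvRunB (pvAdj j i :: rest :: stk) (pvBump g j i) (PySem.Set.add wf (j, i)) =
          pvRunB stk
            (pvGoA rest (pvGoA (pvAdj j i) (pvBump g j i) (PySem.Set.union wf [(j, i)])).val.1
              (PySem.Set.union wf (pvGoA (pvAdj j i) (pvBump g j i) (PySem.Set.union wf [(j, i)])).val.2)).val.1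
            (pvGoA rest (pvGoA (pvAdj j i) (pvBump g j i) (PySem.Set.union wf [(j, i)])).val.1
              (PySem.Set.union wf (pvGoA (pvAdj j i) (pvBump g j i) (PySem.Set.union wf [(j, i)])).val.2)).val.2
        rw [hcu, ← pvUnion_singleton,
          pvSim (pvAdj j i) (pvBump g j i) (PySem.Set.union wf [(j, i)]) (rest :: stk),
          pvSim rest (pvGoA (pvAdj j i) (pvBump g j i) (PySem.Set.union wf [(j, i)])).val.1
            (pvGoA (pvAdj j i) (pvBump g j i) (PySem.Set.union wf [(j, i)])).val.2 stk]
      · rw [pvRunB, pvGoA, dif_pos hin, dif_neg hfl, dif_pos hin, dif_neg hfl]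
        exact pvSim rest (pvBump g j i) wf stk
    · rw [pvRunB, pvGoA, dif_neg hin, dif_neg hin]
      exact pvSim rest g wf stk
termination_by 9 * pvFree g wf + p.length
decreasing_by
  · have h1 : pvFree (pvBump g j i) (PySem.Set.union wf [(j, i)]) < pvFree g wf := by
      rw [pvFree_bump g j i hj0, pvUnion_singleton]
      exact pvFree_flash hin hfl.2 (by simp [PySem.Set.mem_add]) (fun c hc => by simp [PySem.Set.mem_add, hc])
    simp only [pvAdj, List.length_cons, List.length_nil]
    omega
  · have hc := (pvGoA (pvAdj j i) (pvBump g j i) (PySem.Set.union wf [(j, i)])).property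
    have hcg : pvFree (pvGoA (pvAdj j i) (pvBump g j i) (PySem.Set.union wf [(j, i)])).val.1
        (pvGoA (pvAdj j i) (pvBump g j i) (PySem.Set.union wf [(j, i)])).val.2
        = pvFree g (pvGoA (pvAdj j i) (pvBump g j i) (PySem.Set.union wf [(j, i)])).val.2 :=
      pvFree_congr (hc.1.trans (pvBump_shape g j i hj0)) _
    have h2 : pvFree g (pvGoA (pvAdj j i) (pvBump g j i) (PySem.Set.union wf [(j, i)])).val.2 < pvFree g wf :=
      pvFree_flash hin hfl.2
        (pvExt_mem hc.2 (by simp [pvUnion_singleton, PySem.Set.mem_add]))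
        (fun cc hcc => pvExt_mem (pvExt_trans hwfu hc.2) hcc)
    simp only [List.length_cons]; omega
  · have h3 : pvFree (pvBump g j i) wf = pvFree g wf := pvFree_bump g j i hj0 wf
    simp only [List.length_cons]; omega
  · simp only [List.length_cons]; omega

-- ===== VERDICT (by name: the statement is the Claim_ definition above) =====
theorem process_flashes_spec : Claim_equal_process_flashes := by
  intro y x octopi will_flash _
  show process_flashes y x octopi will_flash = process_flashes_alt y x octopi will_flash
  rw [process_flashes, process_flashes_alt, pvSim (pvAdj y x) octopi will_flash [], pvRunB]
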